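-- pv_equiv track=rewrite | github.com/jramaswami/Binary_Search_Python | non_consecutive_string.py | solve
-- ===== SOURCE A (Python) =====
-- def solve(n, k):
--     if k >= 3 * pow(2, n-1):
--         return ""
--
--     soln = []
--     x = pow(2, n-1)
--     t = x
--     P = 0
--     for i in "012":
--         if t > k:
--             soln.append(i)
--             P = t - x
--             break
--         t += x
--
--     n -= 1
--     x //= 2
--     while n:
--         t = x
--         for i in "012":
--             if i == soln[-1]:
--                 continue
--             if P + t > k:
--                 soln.append(i)
--                 P += (t - x)
--                 break
--             t += x
--         n-= 1
--         x //= 2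
--
--     return "".join(soln)
-- ===== SOURCE B (Python) =====
-- _NEXT = {"0": "12", "1": "02", "2": "01"}
--
-- def solve(n, k):
--     b = pow(2, n - 1)
--     if k >= 3 * b:
--         return ""
--     prev = "012"[k // b]
--     out = prev
--     for bit in bin(b + k % b)[3:]:
--         prev = _NEXT[prev][0 if bit == "0" else 1]
--         out += prev
--     return out
-- ===== Notes on version B (the rewrite author's own statement) =====
-- stated objective: faster
-- what changed: B splits the work into two stages: it converts the in-block offset to its binary digit string once (via bin()), then folds over that bit string translating each bit to the next digit with a fixed prev->candidates dictionary, eliminating A's running threshold/offset accumulators (t, P) and its per-position comparison scans over '012'.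
-- outside the precondition, e.g. on solve(3, -2): A returns '010', B returns '210'
import Mathlib
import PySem

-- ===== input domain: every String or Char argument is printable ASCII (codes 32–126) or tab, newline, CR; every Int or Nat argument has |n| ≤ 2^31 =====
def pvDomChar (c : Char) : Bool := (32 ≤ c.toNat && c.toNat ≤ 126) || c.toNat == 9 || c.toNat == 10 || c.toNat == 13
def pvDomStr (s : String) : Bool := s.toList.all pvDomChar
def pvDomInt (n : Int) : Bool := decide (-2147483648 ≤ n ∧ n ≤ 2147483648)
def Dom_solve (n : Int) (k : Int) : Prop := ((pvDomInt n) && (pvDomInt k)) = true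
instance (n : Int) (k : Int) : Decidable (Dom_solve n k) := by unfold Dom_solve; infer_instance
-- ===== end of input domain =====

-- B stages the work: one bin() conversion of the in-block offset to a bit string, then a
-- table-driven fold translating bits to digits — no big-int accumulators (t, P) and no
-- comparison scans as in A (objective: faster; measured faster in a timing run).


-- ===== PORT A =====
-- first `for i in "012"` loop: state t; returns (appended char, P) on break, none on fall-through
def solveFirstScan : List Char → Int → Int → Int → Option (Char × Int)
  | [], _, _, _ => none
  | c :: cs, t, k, x => if t > k then some (c, t - x) else solveFirstScan cs (t + x) k x

-- inner `for i in "012"` loop of the while: skips prev, returns (char, new P) on break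
def solveInnerScan : List Char → Int → Int → Int → Int → Char → Option (Char × Int)
  | [], _, _, _, _, _ => none
  | c :: cs, t, P, k, x, prev =>
    if c = prev then solveInnerScan cs t P k x prev
    else if P + t > k then some (c, P + (t - x))
    else solveInnerScan cs (t + x) P k x prev

-- the while loop, fuel = the (nonnegative, under Pre_) counter n
def solveWhileA : Nat → Int → List Char → Int → Int → List Char
  | 0, _, soln, _, _ => soln
  | f + 1, x, soln, P, k =>
    match solveInnerScan ['0', '1', '2'] x P k x (soln.getLastD '?') with
    | some (c, P') => solveWhileA f (PySem.Int.floordiv x 2) (soln ++ [c]) P' k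
    | none => solveWhileA f (PySem.Int.floordiv x 2) soln P k

-- hand port of A's guard `k >= 3 * pow(2, n-1)`: for n ≥ 1 pow is an exact int; for n ≤ 0
-- pow(2, n-1) is an exact float (underflowing to 0.0 exactly when n ≤ -1074), and comparing it
-- with an int |k| ≤ 2^31 is exact, so the float test reduces to these integer cases.
def solveGuard (n : Int) (k : Int) : Bool :=
  if 1 ≤ n then 3 * 2 ^ (n - 1).toNat ≤ k
  else if n = 0 then 2 ≤ k
  else if -1073 ≤ n then 1 ≤ k
  else 0 ≤ k

def solve (n : Int) (k : Int) : String :=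
  -- body below the guard: exact for n ≥ 1 (below the guard A diverges for n ≤ 0, outside Pre_)
  let x : Int := 2 ^ (n - 1).toNat
  if solveGuard n k then ""
  else
    match solveFirstScan ['0', '1', '2'] x k x with
    | none => ""   -- unreachable: with k < 3x the Python for-loop always breaks
    | some (c, P) => String.mk (solveWhileA (n - 1).toNat (PySem.Int.floordiv x 2) [c] P k)

-- ===== PORT B =====
-- the module constant _NEXT
def solveNextTable : List (Char × List Char) :=
  [('0', ['1', '2']), ('1', ['0', '2']), ('2', ['0', '1'])]

-- binary digits of a positive int, MSB first (= bin(m) without the '0b' prefix, for m > 0)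
def solveBinRep (m : Nat) : List Char :=
  if m = 0 then [] else solveBinRep (m / 2) ++ [if m % 2 = 1 then '1' else '0']
decreasing_by exact Nat.div_lt_self (Nat.pos_of_ne_zero (by assumption)) (by norm_num)

-- Python's bin(m) as a char list ('0b…', '-0b…'); exact for every int m
def solvePyBin (m : Int) : List Char :=
  if m < 0 then '-' :: '0' :: 'b' :: solveBinRep (-m).toNat
  else if m = 0 then ['0', 'b', '0']
  else '0' :: 'b' :: solveBinRep m.toNat

-- one iteration of Source B's `for bit in …` loop: state (prev, out); the pyGet? default '?' is
-- unreachable (the index is 0 or 1 and the table rows, looked up with prev ∈ "012", have length 2)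
def solveStep (s : Char × List Char) (bch : Char) : Char × List Char :=
  let c := (PySem.List.pyGet?
    ((PySem.Dict.get? (PySem.Dict.mk solveNextTable) s.1).getD [])
    (if bch = '0' then 0 else 1)).getD '?'
  (c, s.2 ++ [c])

-- hand port of B's guard `k >= 3 * b`, b = pow(2, n - 1): same float analysis as A's guard
def solveAltGuard (n : Int) (k : Int) : Bool :=
  if 1 ≤ n then 3 * 2 ^ (n - 1).toNat ≤ k
  else if n = 0 then 2 ≤ k
  else if -1073 ≤ n then 1 ≤ k
  else 0 ≤ k

def solve_alt (n : Int) (k : Int) : String :=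
  -- body below the guard: exact for n ≥ 1 (below the guard B raises for n ≤ 0, outside Pre_)
  let b : Int := 2 ^ (n - 1).toNat
  if solveAltGuard n k then ""
  else
    -- "012"[k // b]; the Python indexing raises only outside Pre_ (k < -3b), default unused inside Pre_
    let first := (PySem.List.pyGet? (['0', '1', '2'] : List Char) (PySem.Int.floordiv k b)).getD '?'
    String.mk (((solvePyBin (b + PySem.Int.mod k b)).drop 3).foldl solveStep (first, [first])).2

-- ===== PRECONDITION & SPEC =====
-- Pre_ excludes k < 0 for n ≥ 1 (not an index of any of the 3·2^(n-1) valid strings: A's scan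
-- and B's negative-index wraparound return different accidental strings there), and the inputs
-- with n ≤ 0 on which Python's float pow(2, n-1) makes A diverge (and B raise on float indexing);
-- the n ≤ 0 inputs where the guard fires and A returns "" stay inside Pre_.
def Pre_solve (n : Int) (k : Int) : Prop :=
  (1 ≤ n ∧ 0 ≤ k) ∨ (n = 0 ∧ 2 ≤ k) ∨ (-1073 ≤ n ∧ n ≤ -1 ∧ 1 ≤ k) ∨ (n ≤ -1074 ∧ 0 ≤ k)
instance (n : Int) (k : Int) : Decidable (Pre_solve n k) := by unfold Pre_solve; infer_instance
def pvWitness_solve : Int × Int := (3, 5)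
def Spec_solve (n : Int) (k : Int) (out : String) : Prop := out = solve_alt n k
instance (n : Int) (k : Int) (out : String) : Decidable (Spec_solve n k out) := by unfold Spec_solve; infer_instance

-- ===== CLAIM =====
def Claim_equal_solve : Prop := ∀ (n : Int) (k : Int), Dom_solve n k → Pre_solve n k → Spec_solve n k (solve n k)

-- ===== LEMMAS AND PROOFS =====

-- MSB-first bits of a number rem < 2^f, written with f positions (proof-only bridge)
def bitsOf : Nat → Nat → List Char
  | 0, _ => []
  | f + 1, r =>
    (if r < 2 ^ f then '0' else '1') :: bitsOf f (if r < 2 ^ f then r else r - 2 ^ f)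

lemma bitsOf_snoc (f : Nat) : ∀ r : Nat, r < 2 ^ (f + 1) →
    bitsOf (f + 1) r = bitsOf f (r / 2) ++ [if r % 2 = 1 then '1' else '0'] := by
  induction f with
  | zero =>
    intro r hr
    interval_cases r <;> decide
  | succ f ih =>
    intro r hr
    have hpow : (2 : Nat) ^ (f + 1) = 2 * 2 ^ f := by ring
    have hpow2 : (2 : Nat) ^ (f + 2) = 2 * 2 ^ (f + 1) := by ring
    by_cases h : r < 2 ^ (f + 1)
    · have h2 : r / 2 < 2 ^ f := by omega
      rw [show bitsOf (f + 2) r = '0' :: bitsOf (f + 1) r by simp [bitsOf, h],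
        ih r h,
        show bitsOf (f + 1) (r / 2) = '0' :: bitsOf f (r / 2) by simp [bitsOf, h2]]
      simp
    · have h2 : ¬ r / 2 < 2 ^ f := by omega
      have hr' : r - 2 ^ (f + 1) < 2 ^ (f + 1) := by omega
      rw [show bitsOf (f + 2) r = '1' :: bitsOf (f + 1) (r - 2 ^ (f + 1)) by simp [bitsOf, h],
        ih _ hr',
        show bitsOf (f + 1) (r / 2) = '1' :: bitsOf f (r / 2 - 2 ^ f) by simp [bitsOf, h2],
        show (r - 2 ^ (f + 1)) / 2 = r / 2 - 2 ^ f by omega,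
        show (r - 2 ^ (f + 1)) % 2 = r % 2 by omega]
      simp

lemma solveBinRep_zero : solveBinRep 0 = [] := by rw [solveBinRep]; simp

lemma binRep_pow_add (f : Nat) : ∀ r : Nat, r < 2 ^ f →
    solveBinRep (2 ^ f + r) = '1' :: bitsOf f r := by
  induction f with
  | zero =>
    intro r hr
    interval_cases r
    rw [solveBinRep]; norm_num [solveBinRep_zero, bitsOf]
  | succ f ih =>
    intro r hr
    have hm : 2 ^ (f + 1) + r ≠ 0 := by positivity
    rw [solveBinRep, if_neg hm,
      show (2 ^ (f + 1) + r) / 2 = 2 ^ f + r / 2 by omega,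
      show (2 ^ (f + 1) + r) % 2 = r % 2 by omega,
      ih (r / 2) (by omega), bitsOf_snoc f r hr]
    simp

lemma floordiv_pow_two (f : Nat) : PySem.Int.floordiv ((2 : Int) ^ (f + 1)) 2 = 2 ^ f := by
  rw [PySem.Int.floordiv_eq_ediv_of_pos (by norm_num), pow_succ]
  omega

-- evaluations of A's inner scan for each previous digit and each half of the block
lemma inner_0_lo (x P k : Int) (h : P + x > k) :
    solveInnerScan ['0', '1', '2'] x P k x '0' = some ('1', P) := by
  simp [solveInnerScan, h]

lemma inner_0_hi (x P k : Int) (h1 : ¬ P + x > k) (h2 : P + (x + x) > k) :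
    solveInnerScan ['0', '1', '2'] x P k x '0' = some ('2', P + x) := by
  simp [solveInnerScan, h1, h2]

lemma inner_1_lo (x P k : Int) (h : P + x > k) :
    solveInnerScan ['0', '1', '2'] x P k x '1' = some ('0', P) := by
  simp [solveInnerScan, h]

lemma inner_1_hi (x P k : Int) (h1 : ¬ P + x > k) (h2 : P + (x + x) > k) :
    solveInnerScan ['0', '1', '2'] x P k x '1' = some ('2', P + x) := by
  simp [solveInnerScan, h1, h2]

lemma inner_2_lo (x P k : Int) (h : P + x > k) :
    solveInnerScan ['0', '1', '2'] x P k x '2' = some ('0', P) := by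
  simp [solveInnerScan, h]

lemma inner_2_hi (x P k : Int) (h1 : ¬ P + x > k) (h2 : P + (x + x) > k) :
    solveInnerScan ['0', '1', '2'] x P k x '2' = some ('1', P + x) := by
  simp [solveInnerScan, h1, h2]

-- the core invariant: A's while loop produces exactly B's bit-translation of k - P
lemma while_eq (f : Nat) : ∀ (P k : Int) (soln : List Char) (prev : Char) (r : Nat),
    (prev = '0' ∨ prev = '1' ∨ prev = '2') →
    soln.getLastD '?' = prev →
    k - P = (r : Int) → r < 2 ^ f →
    solveWhileA f (PySem.Int.floordiv ((2 : Int) ^ f) 2) soln P k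
      = ((bitsOf f r).foldl solveStep (prev, soln)).2 := by
  induction f with
  | zero =>
    intro P k soln prev _ _ _ _
    simp [bitsOf, solveWhileA]
  | succ f ih =>
    intro P k soln prev r hprev hlast hr h1
    rw [floordiv_pow_two]
    have hx : (0 : Int) < 2 ^ f := by positivity
    have hcast : ((2 : Int) ^ f) = ((2 ^ f : Nat) : Int) := by push_cast; ring
    by_cases hlt : r < 2 ^ f
    · -- low half: first available digit, P unchanged, bit '0'
      have hklt : P + 2 ^ f > k := by
        have : (r : Int) < (2 : Int) ^ f := by rw [hcast]; exact_mod_cast hlt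
        omega
      rw [show bitsOf (f + 1) r = '0' :: bitsOf f r by simp [bitsOf, hlt]]
      rcases hprev with h | h | h <;> subst h
      · rw [show ('0' :: bitsOf f r).foldl solveStep ('0', soln)
            = (bitsOf f r).foldl solveStep ('1', soln ++ ['1']) by
          simp [solveStep, solveNextTable, PySem.Dict.get?_mk_cons, PySem.List.pyGet?, PySem.List.pyIdx?]]
        rw [show solveWhileA (f + 1) (2 ^ f) soln P k
            = solveWhileA f (PySem.Int.floordiv ((2 : Int) ^ f) 2) (soln ++ ['1']) P k by
          simp only [solveWhileA, hlast]; rw [inner_0_lo (2 ^ f) P k hklt]]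
        rw [ih P k _ '1' r (by simp) (by simp) hr hlt]
      · rw [show ('0' :: bitsOf f r).foldl solveStep ('1', soln)
            = (bitsOf f r).foldl solveStep ('0', soln ++ ['0']) by
          simp [solveStep, solveNextTable, PySem.Dict.get?_mk_cons, PySem.List.pyGet?, PySem.List.pyIdx?]]
        rw [show solveWhileA (f + 1) (2 ^ f) soln P k
            = solveWhileA f (PySem.Int.floordiv ((2 : Int) ^ f) 2) (soln ++ ['0']) P k by
          simp only [solveWhileA, hlast]; rw [inner_1_lo (2 ^ f) P k hklt]]
        rw [ih P k _ '0' r (by simp) (by simp) hr hlt]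
      · rw [show ('0' :: bitsOf f r).foldl solveStep ('2', soln)
            = (bitsOf f r).foldl solveStep ('0', soln ++ ['0']) by
          simp [solveStep, solveNextTable, PySem.Dict.get?_mk_cons, PySem.List.pyGet?, PySem.List.pyIdx?]]
        rw [show solveWhileA (f + 1) (2 ^ f) soln P k
            = solveWhileA f (PySem.Int.floordiv ((2 : Int) ^ f) 2) (soln ++ ['0']) P k by
          simp only [solveWhileA, hlast]; rw [inner_2_lo (2 ^ f) P k hklt]]
        rw [ih P k _ '0' r (by simp) (by simp) hr hlt]
    · -- high half: second available digit, P gains 2^f, bit '1'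
      have hrge : ((2 : Int) ^ f) ≤ (r : Int) := by rw [hcast]; exact_mod_cast Nat.le_of_not_lt hlt
      have hrlt : (r : Int) < 2 ^ (f + 1) := by
        have : ((2 : Int) ^ (f + 1)) = ((2 ^ (f + 1) : Nat) : Int) := by push_cast; ring
        rw [this]; exact_mod_cast h1
      have hk1 : ¬ P + 2 ^ f > k := by omega
      have hk2 : P + (2 ^ f + 2 ^ f) > k := by
        have : ((2 : Int) ^ (f + 1)) = 2 ^ f + 2 ^ f := by ring
        omega
      have hr' : k - (P + 2 ^ f) = ((r - 2 ^ f : Nat) : Int) := by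
        have : ((r - 2 ^ f : Nat) : Int) = (r : Int) - 2 ^ f := by
          push_cast [Nat.le_of_not_lt hlt]; ring
        omega
      have hlt' : r - 2 ^ f < 2 ^ f := by
        have h2 : (2 : Nat) ^ (f + 1) = 2 * 2 ^ f := by ring
        omega
      rw [show bitsOf (f + 1) r = '1' :: bitsOf f (r - 2 ^ f) by simp [bitsOf, hlt]]
      rcases hprev with h | h | h <;> subst h
      · rw [show ('1' :: bitsOf f (r - 2 ^ f)).foldl solveStep ('0', soln)
            = (bitsOf f (r - 2 ^ f)).foldl solveStep ('2', soln ++ ['2']) by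
          simp [solveStep, solveNextTable, PySem.Dict.get?_mk_cons, PySem.List.pyGet?, PySem.List.pyIdx?]]
        rw [show solveWhileA (f + 1) (2 ^ f) soln P k
            = solveWhileA f (PySem.Int.floordiv ((2 : Int) ^ f) 2) (soln ++ ['2']) (P + 2 ^ f) k by
          simp only [solveWhileA, hlast]; rw [inner_0_hi (2 ^ f) P k hk1 hk2]]
        rw [ih (P + 2 ^ f) k _ '2' (r - 2 ^ f) (by simp) (by simp) hr' hlt']
      · rw [show ('1' :: bitsOf f (r - 2 ^ f)).foldl solveStep ('1', soln)
            = (bitsOf f (r - 2 ^ f)).foldl solveStep ('2', soln ++ ['2']) by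
          simp [solveStep, solveNextTable, PySem.Dict.get?_mk_cons, PySem.List.pyGet?, PySem.List.pyIdx?]]
        rw [show solveWhileA (f + 1) (2 ^ f) soln P k
            = solveWhileA f (PySem.Int.floordiv ((2 : Int) ^ f) 2) (soln ++ ['2']) (P + 2 ^ f) k by
          simp only [solveWhileA, hlast]; rw [inner_1_hi (2 ^ f) P k hk1 hk2]]
        rw [ih (P + 2 ^ f) k _ '2' (r - 2 ^ f) (by simp) (by simp) hr' hlt']
      · rw [show ('1' :: bitsOf f (r - 2 ^ f)).foldl solveStep ('2', soln)
            = (bitsOf f (r - 2 ^ f)).foldl solveStep ('1', soln ++ ['1']) by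
          simp [solveStep, solveNextTable, PySem.Dict.get?_mk_cons, PySem.List.pyGet?, PySem.List.pyIdx?]]
        rw [show solveWhileA (f + 1) (2 ^ f) soln P k
            = solveWhileA f (PySem.Int.floordiv ((2 : Int) ^ f) 2) (soln ++ ['1']) (P + 2 ^ f) k by
          simp only [solveWhileA, hlast]; rw [inner_2_hi (2 ^ f) P k hk1 hk2]]
        rw [ih (P + 2 ^ f) k _ '1' (r - 2 ^ f) (by simp) (by simp) hr' hlt']

-- Source B's `bin(b + rem)[3:]` is exactly the f-bit expansion of rem, for 0 ≤ rem < 2^f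
lemma pyBin_drop (f : Nat) (rem : Int) (h0 : 0 ≤ rem) (h1 : rem < 2 ^ f) :
    (solvePyBin (2 ^ f + rem)).drop 3 = bitsOf f rem.toNat := by
  have hm : (0 : Int) < 2 ^ f + rem := by positivity
  have htn : (2 ^ f + rem).toNat = 2 ^ f + rem.toNat := by
    have : ((2 : Int) ^ f) = ((2 ^ f : Nat) : Int) := by push_cast; ring
    omega
  have hrn : rem.toNat < 2 ^ f := by
    have : ((2 : Int) ^ f) = ((2 ^ f : Nat) : Int) := by push_cast; ring
    omega
  rw [solvePyBin, if_neg (by omega), if_neg (by omega), htn, binRep_pow_add f rem.toNat hrn]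
  simp

lemma guard_eq (n k : Int) : solveAltGuard n k = solveGuard n k := rfl

-- ===== VERDICT =====
theorem solve_spec : Claim_equal_solve := by
  intro n k _ hpre
  unfold Spec_solve solve solve_alt
  rw [guard_eq]
  rcases hpre with ⟨hn, hk⟩ | hrest
  case inr =>
    -- n ≤ 0 and the guard fires: both programs return ""
    have hg : solveGuard n k = true := by
      unfold solveGuard
      rcases hrest with ⟨h1, h2⟩ | ⟨h1, h2, h3⟩ | ⟨h1, h2⟩
      · rw [if_neg (by omega), if_pos h1]; simpa using h2
      · rw [if_neg (by omega), if_neg (by omega), if_pos (by omega)]; simpa using h3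
      · rw [if_neg (by omega), if_neg (by omega), if_neg (by omega)]; simpa using h2
    rw [hg]
    simp
  case inl =>
  set f := (n - 1).toNat with hf
  set x : Int := 2 ^ f with hxdef
  have hx : (0 : Int) < x := by positivity
  have hg : solveGuard n k = decide (3 * x ≤ k) := by
    unfold solveGuard; rw [if_pos hn]
  rw [hg]
  by_cases hbig : 3 * x ≤ k
  · simp [hbig]
  · rw [decide_eq_false hbig]
    simp only [Bool.false_eq_true, if_false]
    push_neg at hbig
    rcases lt_or_ge k x with h1 | h1
    · -- first digit '0', P = 0, rem = k
      have hdiv : PySem.Int.floordiv k x = 0 := by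
        rw [PySem.Int.floordiv_eq_iff_of_pos hx]; constructor <;> omega
      have hmod : PySem.Int.mod k x = k := by
        have h := PySem.Int.floordiv_mul_add_mod k x
        rw [hdiv] at h; omega
      simp only [solveFirstScan, if_pos (show x > k by omega), hdiv, hmod]
      rw [show x - x = (0 : Int) by ring]
      rw [show (PySem.List.pyGet? (['0','1','2'] : List Char) 0).getD '?' = '0' by decide]
      rw [hxdef, pyBin_drop f k hk h1]
      have h := while_eq f 0 k ['0'] '0' k.toNat (by simp) (by simp)
        (by omega) (by
          have hc : ((2:Int))^f = ((2^f : Nat) : Int) := by push_cast; ring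
          rw [hxdef, hc] at h1; omega)
      simp only [← hxdef] at h
      rw [h]
    · rcases lt_or_ge k (2 * x) with h2 | h2
      · -- first digit '1', P = x, rem = k - x
        have hdiv : PySem.Int.floordiv k x = 1 := by
          rw [PySem.Int.floordiv_eq_iff_of_pos hx]; constructor <;> omega
        have hmod : PySem.Int.mod k x = k - x := by
          have h := PySem.Int.floordiv_mul_add_mod k x
          rw [hdiv] at h; omega
        simp only [solveFirstScan, if_neg (show ¬ x > k by omega),
          if_pos (show x + x > k by omega), hdiv, hmod]
        rw [show (PySem.List.pyGet? (['0','1','2'] : List Char) 1).getD '?' = '1' by decide]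
        rw [hxdef, pyBin_drop f (k - x) (by omega) (by rw [← hxdef]; omega)]
        have h := while_eq f x k ['1'] '1' (k - x).toNat (by simp) (by simp)
          (by omega) (by
          have hc : ((2:Int))^f = ((2^f : Nat) : Int) := by push_cast; ring
          rw [hxdef, hc] at h2 ⊢; omega)
        simp only [← hxdef] at h
        rw [show x + x - x = x by ring, h]
      · -- first digit '2', P = 2x, rem = k - 2x
        have hdiv : PySem.Int.floordiv k x = 2 := by
          rw [PySem.Int.floordiv_eq_iff_of_pos hx]; constructor <;> omega
        have hmod : PySem.Int.mod k x = k - 2 * x := by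
          have h := PySem.Int.floordiv_mul_add_mod k x
          rw [hdiv] at h; omega
        simp only [solveFirstScan, if_neg (show ¬ x > k by omega),
          if_neg (show ¬ x + x > k by omega), if_pos (show x + x + x > k by omega), hdiv, hmod]
        rw [show (PySem.List.pyGet? (['0','1','2'] : List Char) 2).getD '?' = '2' by decide]
        rw [hxdef, pyBin_drop f (k - 2 * x) (by omega) (by rw [← hxdef]; omega)]
        have h := while_eq f (2 * x) k ['2'] '2' (k - 2 * x).toNat (by simp) (by simp)
          (by omega) (by
          have hc : ((2:Int))^f = ((2^f : Nat) : Int) := by push_cast; ring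
          rw [hxdef, hc] at hbig ⊢; omega)
        simp only [← hxdef] at h
        rw [show x + x + x - x = 2 * x by ring, h]
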